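-- pv_equiv track=rewrite | github.com/VaHiX/CodeForces | Python/ByTier/C/1970_C2_Game_on_Tree_Medium.py | game_on_tree_winner
-- ===== SOURCE A (Python) =====
-- def game_on_tree_winner(n, edges, initial_stone):
--     # Build adjacency list representation of the tree
--     adj_list = [[] for _ in range(n + 1)]
--     for u, v in edges:
--         adj_list[u].append(v)
--         adj_list[v].append(u)
--
--     visited = set()
--
--     # Recursive DFS to determine the winner from a given node
--     def dfs(player, node):
--         # Mark current node as visited to avoid cycles
--         visited.add(node)
--         # Switch to the other player (0 -> 1, 1 -> 0)
--         next_player = 1 - player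
--         # Traverse all neighbors
--         for neighbor in adj_list[node]:
--             if neighbor not in visited:
--                 # Recursively check result of moving to this neighbor
--                 winner = dfs(next_player, neighbor)
--                 # If the result is the current player's win, return it
--                 if winner == player:
--                     return winner
--         # If no move leads to current player's win, opponent wins
--         return next_player
--
--     # Start the game with Ron (player 0) at the initial stone position
--     return "Ron" if dfs(0, initial_stone) == 0 else "Hermione"
-- ===== SOURCE B (Python) =====
-- def game_on_tree_winner(n, edges, initial_stone):
--     # Same adjacency build as the task describes; then an explicit stack machine
--     # (iterative DFS with the same early cut-off) instead of recursion.
--     adj = [[] for _ in range(n + 1)]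
--     for u, v in edges:
--         adj[u].append(v)
--         adj[v].append(u)
--     visited = {initial_stone}
--     # frame = (player to move at this node, node, next neighbor index to scan)
--     stack = [(0, initial_stone, 0)]
--     ret = None  # result of the call that just finished, if any
--     while stack:
--         player, node, i = stack.pop()
--         if ret is not None:
--             if ret == player:
--                 continue  # early return: this winner propagates upward
--             ret = None
--         nbrs = adj[node]
--         pushed = False
--         while i < len(nbrs):
--             nb = nbrs[i]
--             i += 1
--             if nb not in visited:
--                 visited.add(nb)
--                 stack.append((player, node, i))
--                 stack.append((1 - player, nb, 0))
--                 pushed = True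
--                 break
--         if not pushed:
--             ret = 1 - player  # no winning move: the opponent wins this call
--     return "Ron" if ret == 0 else "Hermione"
-- ===== Notes on version B (the rewrite author's own statement) =====
-- stated objective: alternative
-- what changed: A's recursive dfs (closure over a visited set, early return of the winning player) is replaced by an explicit iterative stack machine: frames (player, node, next-neighbor-index) on a stack, a ret register threading the finished call's winner, with the same early cut-off; no recursion.
import Mathlib
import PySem

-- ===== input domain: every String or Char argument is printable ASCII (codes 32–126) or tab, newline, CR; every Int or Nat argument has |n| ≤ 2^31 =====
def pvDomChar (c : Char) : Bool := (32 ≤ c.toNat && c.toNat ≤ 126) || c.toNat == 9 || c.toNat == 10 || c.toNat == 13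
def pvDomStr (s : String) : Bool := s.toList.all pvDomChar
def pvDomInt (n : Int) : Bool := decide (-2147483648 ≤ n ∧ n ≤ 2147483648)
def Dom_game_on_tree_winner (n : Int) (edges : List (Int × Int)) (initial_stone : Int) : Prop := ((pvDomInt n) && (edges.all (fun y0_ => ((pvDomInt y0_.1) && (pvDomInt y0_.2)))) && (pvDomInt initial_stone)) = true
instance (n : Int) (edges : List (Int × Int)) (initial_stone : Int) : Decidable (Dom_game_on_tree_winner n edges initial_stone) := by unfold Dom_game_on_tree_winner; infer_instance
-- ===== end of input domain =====

-- B replaces A's recursive game search by an explicit iterative stack machine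
-- (same adjacency build, frames (player, node, next-index), early cut kept);
-- objective: alternative decomposition, same asymptotic cost.

-- ===== PORT A =====

-- adjacency build: adj_list[u].append(v); adj_list[v].append(u)
def pvAdjA (n : Int) (edges : List (Int × Int)) : List (List Int) :=
  edges.foldl (fun adj uv =>
    let adj1 := PySem.List.pySetD adj uv.1 (PySem.List.pyGetD adj uv.1 [] ++ [uv.2])
    PySem.List.pySetD adj1 uv.2 (PySem.List.pyGetD adj1 uv.2 [] ++ [uv.1]))
    (List.replicate (n + 1).toNat [])

-- A's recursive dfs, with its neighbor loop; fuel only totalizes the recursion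
-- (none = fuel ran out; shown unreachable for the fuel the port passes).
mutual
def dfsA (adj : List (List Int)) : Nat → Int → Int → PySem.Set Int → Option (Int × PySem.Set Int)
  | 0, _, _, _ => none
  | f + 1, player, node, vis =>
      loopA adj f player (PySem.List.pyGetD adj node []) (PySem.Set.add vis node)
termination_by f _ _ _ => (f, 0)

def loopA (adj : List (List Int)) : Nat → Int → List Int → PySem.Set Int → Option (Int × PySem.Set Int)
  | _, player, [], vis => some (1 - player, vis)
  | f, player, nb :: rest, vis =>
      if nb ∈ vis then loopA adj f player rest vis
      else
        match dfsA adj f (1 - player) nb vis with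
        | none => none
        | some (w, vis') =>
            if w = player then some (w, vis') else loopA adj f player rest vis'
termination_by f _ l _ => (f, l.length + 1)
end

def game_on_tree_winner (n : Int) (edges : List (Int × Int)) (initial_stone : Int) : String :=
  let adj := pvAdjA n edges
  match dfsA adj (adj.flatten.length + 2) 0 initial_stone PySem.Set.empty with
  | some (w, _) => if w = 0 then "Ron" else "Hermione"
  | none => "Hermione"   -- fuel exhausted: unreachable (dfsA terminates within this fuel)

-- ===== PORT B =====

def pvAdjB (n : Int) (edges : List (Int × Int)) : List (List Int) :=
  edges.foldl (fun adj uv =>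
    let adj1 := PySem.List.pySetD adj uv.1 (PySem.List.pyGetD adj uv.1 [] ++ [uv.2])
    PySem.List.pySetD adj1 uv.2 (PySem.List.pyGetD adj1 uv.2 [] ++ [uv.1]))
    (List.replicate (n + 1).toNat [])

-- Source B's inner `while i < len(nbrs)` scan: first unvisited neighbor from index i
def scanB (vis : PySem.Set Int) (nbrs : List Int) (i : Nat) : Option (Int × Nat) :=
  match h : nbrs[i]? with
  | none => none
  | some nb => if nb ∈ vis then scanB vis nbrs (i + 1) else some (nb, i + 1)
termination_by nbrs.length - i
decreasing_by
  obtain ⟨hlt, -⟩ := List.getElem?_eq_some_iff.mp h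
  omega

-- Source B's `while stack` loop: state = (stack of frames, visited, ret);
-- fuel only totalizes the loop (none = fuel ran out; shown unreachable).
def runB (adj : List (List Int)) : Nat → List (Int × Int × Nat) → PySem.Set Int → Option Int → Option Int
  | _, [], _, ret => ret
  | 0, _ :: _, _, _ => none
  | f + 1, (p, node, i) :: stk, vis, ret =>
      if ret = some p then runB adj f stk vis ret
      else
        match scanB vis (PySem.List.pyGetD adj node []) i with
        | some (nb, i') =>
            runB adj f ((1 - p, nb, 0) :: (p, node, i') :: stk) (PySem.Set.add vis nb) none
        | none => runB adj f stk vis (some (1 - p))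

def game_on_tree_winner_alt (n : Int) (edges : List (Int × Int)) (initial_stone : Int) : String :=
  let adj := pvAdjB n edges
  let ret := runB adj (3 * adj.flatten.length + 10) [(0, initial_stone, 0)]
      (PySem.Set.add PySem.Set.empty initial_stone) none
  if ret = some 0 then "Ron" else "Hermione"

-- ===== PRECONDITION & SPEC =====

-- Pre_ excludes exactly the inputs where Python A raises an IndexError:
-- n < 0, or the start node / an edge endpoint is not a valid Python index into
-- the (n+1)-element adjacency list.
def Pre_game_on_tree_winner (n : Int) (edges : List (Int × Int)) (initial_stone : Int) : Prop :=
  0 ≤ n ∧ PySem.Raise.InRange (n + 1).toNat initial_stone ∧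
    ∀ uv ∈ edges, PySem.Raise.InRange (n + 1).toNat uv.1 ∧ PySem.Raise.InRange (n + 1).toNat uv.2

instance (n : Int) (edges : List (Int × Int)) (initial_stone : Int) : Decidable (Pre_game_on_tree_winner n edges initial_stone) := by unfold Pre_game_on_tree_winner; infer_instance

def pvWitness_game_on_tree_winner : Int × (List (Int × Int)) × Int := (3, [(1, 2), (2, 3)], 1)

def Spec_game_on_tree_winner (n : Int) (edges : List (Int × Int)) (initial_stone : Int) (out : String) : Prop := out = game_on_tree_winner_alt n edges initial_stone
instance (n : Int) (edges : List (Int × Int)) (initial_stone : Int) (out : String) : Decidable (Spec_game_on_tree_winner n edges initial_stone out) := by unfold Spec_game_on_tree_winner; infer_instance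

-- ===== CLAIM (what is proved, stated in full; the proofs are below) =====
def Claim_equal_game_on_tree_winner : Prop := ∀ (n : Int) (edges : List (Int × Int)) (initial_stone : Int), Dom_game_on_tree_winner n edges initial_stone → Pre_game_on_tree_winner n edges initial_stone → Spec_game_on_tree_winner n edges initial_stone (game_on_tree_winner n edges initial_stone)

-- ===== LEMMAS AND PROOFS =====

theorem pvAdjB_eq (n : Int) (edges : List (Int × Int)) : pvAdjB n edges = pvAdjA n edges := rfl

theorem pyGetD_nil_subset_flatten (adj : List (List Int)) (node : Int) :
    PySem.List.pyGetD adj node [] ⊆ adj.flatten := by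
  rcases h : PySem.List.pyGet? adj node with _ | l
  · rw [PySem.List.pyGetD_of_none adj node [] h]
    exact List.nil_subset _
  · have hm : l ∈ adj := PySem.List.mem_of_pyGet?_eq_some adj h
    have : PySem.List.pyGetD adj node [] = l := by
      simp [PySem.List.pyGetD, h]
    rw [this]
    intro x hx
    exact List.mem_flatten.mpr ⟨l, hm, hx⟩

theorem scanB_nil (vis : PySem.Set Int) (nbrs : List Int) (i : Nat)
    (h : nbrs.drop i = []) : scanB vis nbrs i = none := by
  have : nbrs[i]? = none := by
    rw [List.getElem?_eq_none_iff]
    have := List.drop_eq_nil_iff.mp h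
    omega
  rw [scanB, this]

theorem scanB_skip (vis : PySem.Set Int) (nbrs : List Int) (i : Nat) (nb : Int)
    (h : nbrs[i]? = some nb) (hm : nb ∈ vis) : scanB vis nbrs i = scanB vis nbrs (i + 1) := by
  rw [scanB, h]
  simp [hm]

theorem scanB_found (vis : PySem.Set Int) (nbrs : List Int) (i : Nat) (nb : Int)
    (h : nbrs[i]? = some nb) (hm : nb ∉ vis) : scanB vis nbrs i = some (nb, i + 1) := by
  rw [scanB, h]
  simp [hm]

theorem runB_skip (adj : List (List Int)) (t : Nat) (p node : Int) (i : Nat)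
    (stk : List (Int × Int × Nat)) (vis : PySem.Set Int) (ret : Option Int)
    (h : scanB vis (PySem.List.pyGetD adj node []) i = scanB vis (PySem.List.pyGetD adj node []) (i + 1)) :
    runB adj t ((p, node, i) :: stk) vis ret = runB adj t ((p, node, i + 1) :: stk) vis ret := by
  cases t with
  | zero => rfl
  | succ t => rw [runB, runB, h]

-- vis ⊆ vis', nodup is preserved, and new elements come from adj.flatten
theorem loopA_inv (adj : List (List Int)) : ∀ (f : Nat) (p : Int) (L : List Int),
    ∀ (vis : PySem.Set Int) (w : Int) (vis' : PySem.Set Int),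
    L ⊆ adj.flatten → loopA adj f p L vis = some (w, vis') →
    vis ⊆ vis' ∧ (vis.Nodup → vis'.Nodup) ∧ ∀ x ∈ vis', x ∈ vis ∨ x ∈ adj.flatten := by
  intro f
  induction f using Nat.strong_induction_on with
  | _ f IHf =>
    intro p L
    induction L with
    | nil =>
      intro vis w vis' _ heq
      rw [loopA] at heq
      simp only [Option.some.injEq, Prod.mk.injEq] at heq
      obtain ⟨-, rfl⟩ := heq
      exact ⟨fun x hx => hx, fun h => h, fun x hx => Or.inl hx⟩
    | cons nb rest ihL =>
      intro vis w vis' hsub heq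
      rw [loopA] at heq
      by_cases hm : nb ∈ vis
      · simp only [if_pos hm] at heq
        exact ihL vis w vis' (fun x hx => hsub (List.mem_cons_of_mem _ hx)) heq
      · simp only [if_neg hm] at heq
        rcases hd : dfsA adj f (1 - p) nb vis with _ | ⟨wc, visc⟩
        · rw [hd] at heq; simp at heq
        · rw [hd] at heq
          cases f with
          | zero => rw [dfsA] at hd; simp at hd
          | succ f' =>
            rw [dfsA] at hd
            obtain ⟨s1, s2, s3⟩ := IHf f' (by omega) (1 - p) _ _ _ _
              (pyGetD_nil_subset_flatten adj nb) hd
            have haddsub : vis ⊆ PySem.Set.add vis nb :=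
              fun x hx => (PySem.Set.mem_add vis nb x).mpr (Or.inl hx)
            have hnb : nb ∈ adj.flatten := hsub List.mem_cons_self
            have key : vis ⊆ visc ∧ (vis.Nodup → visc.Nodup) ∧
                ∀ x ∈ visc, x ∈ vis ∨ x ∈ adj.flatten := by
              refine ⟨fun x hx => s1 (haddsub hx),
                fun hn => s2 (PySem.Set.nodup_add vis nb hn), ?_⟩
              intro x hx
              rcases s3 x hx with h | h
              · rcases (PySem.Set.mem_add vis nb x).mp h with h' | h'
                · exact Or.inl h'
                · subst h'; exact Or.inr hnb
              · exact Or.inr h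
            obtain ⟨k1, k2, k3⟩ := key
            by_cases hw : wc = p
            · simp only [if_pos hw, Option.some.injEq, Prod.mk.injEq] at heq
              obtain ⟨-, rfl⟩ := heq
              exact ⟨k1, k2, k3⟩
            · simp only [if_neg hw] at heq
              obtain ⟨t1, t2, t3⟩ := ihL visc w vis'
                (fun x hx => hsub (List.mem_cons_of_mem _ hx)) heq
              refine ⟨fun x hx => t1 (k1 hx), fun hn => t2 (k2 hn), ?_⟩
              intro x hx
              rcases t3 x hx with h | h
              · exact k3 x h
              · exact Or.inr h

theorem countP_notmem_add (l vis : List Int) (nb : Int) (h : nb ∉ vis) :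
    l.countP (fun x => !decide (x ∈ vis)) =
      l.countP (fun x => !decide (x ∈ PySem.Set.add vis nb)) + l.count nb := by
  induction l with
  | nil => rfl
  | cons a t ih =>
    by_cases ha : a = nb
    · subst ha
      have h1 : a ∈ PySem.Set.add vis a := (PySem.Set.mem_add vis a a).mpr (Or.inr rfl)
      simp [h, ih]
      omega
    · have h1 : (a ∈ PySem.Set.add vis nb) ↔ (a ∈ vis) := by
        rw [PySem.Set.mem_add]
        simp [ha]
      by_cases h2 : a ∈ vis
      · simp [h2, ih, ha]
      · simp [h2, ih, ha]
        omega

-- the fuel the port of A passes is sufficient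
theorem loopA_suff (adj : List (List Int)) : ∀ (f : Nat) (p : Int) (L : List Int) (vis : PySem.Set Int),
    L ⊆ adj.flatten → adj.flatten.countP (fun x => !decide (x ∈ vis)) ≤ f →
    (loopA adj f p L vis).isSome := by
  intro f
  induction f using Nat.strong_induction_on with
  | _ f IHf =>
    intro p L
    induction L with
    | nil =>
      intro vis _ _
      rw [loopA]
      rfl
    | cons nb rest ihL =>
      intro vis hsub hle
      rw [loopA]
      by_cases hm : nb ∈ vis
      · simp only [if_pos hm]
        exact ihL vis (fun x hx => hsub (List.mem_cons_of_mem _ hx)) hle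
      · have hnb : nb ∈ adj.flatten := hsub List.mem_cons_self
        have hcnt : 0 < adj.flatten.count nb := List.count_pos_iff.mpr hnb
        have hpos : adj.flatten.countP (fun x => !decide (x ∈ vis)) =
            adj.flatten.countP (fun x => !decide (x ∈ PySem.Set.add vis nb)) + adj.flatten.count nb :=
          countP_notmem_add adj.flatten vis nb hm
        cases f with
        | zero => omega
        | succ f' =>
          have hsome : (loopA adj f' (1 - p) (PySem.List.pyGetD adj nb []) (PySem.Set.add vis nb)).isSome :=
            IHf f' (by omega) (1 - p) _ _ (pyGetD_nil_subset_flatten adj nb) (by omega)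
          obtain ⟨⟨wc, visc⟩, hd⟩ := Option.isSome_iff_exists.mp hsome
          have hd' : dfsA adj (f' + 1) (1 - p) nb vis = some (wc, visc) := by
            rw [dfsA]; exact hd
          simp only [if_neg hm, hd']
          by_cases hw : wc = p
          · simp [hw]
          · simp only [if_neg hw]
            obtain ⟨s1, -, -⟩ := loopA_inv adj f' (1 - p) _ _ _ _
              (pyGetD_nil_subset_flatten adj nb) hd
            have hvsub : vis ⊆ visc := fun x hx =>
              s1 ((PySem.Set.mem_add vis nb x).mpr (Or.inl hx))
            have hmono : adj.flatten.countP (fun x => !decide (x ∈ visc)) ≤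
                adj.flatten.countP (fun x => !decide (x ∈ vis)) := by
              apply List.countP_mono_left
              intro a _ ha
              simp only [Bool.not_eq_eq_eq_not, Bool.not_true, decide_eq_false_iff_not] at ha ⊢
              exact fun hx => ha (hvsub hx)
            exact ihL visc (fun x hx => hsub (List.mem_cons_of_mem _ hx)) (by omega)

-- the machine ignores a returned value ≠ the frame's player
theorem runB_clear (adj : List (List Int)) (g : Nat) (p node : Int) (i : Nat)
    (stk : List (Int × Int × Nat)) (vis : PySem.Set Int) (r : Int) (h : r ≠ p) :
    runB adj g ((p, node, i) :: stk) vis (some r) = runB adj g ((p, node, i) :: stk) vis none := by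
  cases g with
  | zero => rfl
  | succ g =>
    rw [runB, runB]
    simp [h]

-- SIMULATION: B's stack machine computes exactly A's recursive dfs loop
theorem simL (adj : List (List Int)) : ∀ (f : Nat) (p node : Int) (i : Nat)
    (stk : List (Int × Int × Nat)) (vis : PySem.Set Int) (w : Int) (vis' : PySem.Set Int),
    loopA adj f p ((PySem.List.pyGetD adj node []).drop i) vis = some (w, vis') →
    ∃ k : Nat, 1 ≤ k ∧ 3 * vis.length + k ≤ 3 * vis'.length + 1 ∧
      ∀ g : Nat, runB adj (g + k) ((p, node, i) :: stk) vis none = runB adj g stk vis' (some w) := by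
  intro f
  induction f using Nat.strong_induction_on with
  | _ f IHf =>
    suffices H : ∀ (j : Nat) (p node : Int) (i : Nat) (stk : List (Int × Int × Nat))
        (vis : PySem.Set Int) (w : Int) (vis' : PySem.Set Int),
        (PySem.List.pyGetD adj node []).length ≤ i + j →
        loopA adj f p ((PySem.List.pyGetD adj node []).drop i) vis = some (w, vis') →
        ∃ k : Nat, 1 ≤ k ∧ 3 * vis.length + k ≤ 3 * vis'.length + 1 ∧
          ∀ g : Nat, runB adj (g + k) ((p, node, i) :: stk) vis none = runB adj g stk vis' (some w) by
      intro p node i stk vis w vis' heq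
      exact H (PySem.List.pyGetD adj node []).length p node i stk vis w vis' (by omega) heq
    intro j
    induction j with
    | zero =>
      intro p node i stk vis w vis' hlen heq
      have hdrop : (PySem.List.pyGetD adj node []).drop i = [] :=
        List.drop_eq_nil_iff.mpr (by omega)
      rw [hdrop, loopA] at heq
      simp only [Option.some.injEq, Prod.mk.injEq] at heq
      obtain ⟨rfl, rfl⟩ := heq
      refine ⟨1, le_refl 1, by omega, ?_⟩
      intro g
      rw [runB]
      simp [scanB_nil vis _ i hdrop]
    | succ j ihj =>
      intro p node i stk vis w vis' hlen heq
      rcases hdrop : (PySem.List.pyGetD adj node []).drop i with _ | ⟨nb, rest⟩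
      · rw [hdrop, loopA] at heq
        simp only [Option.some.injEq, Prod.mk.injEq] at heq
        obtain ⟨rfl, rfl⟩ := heq
        refine ⟨1, le_refl 1, by omega, ?_⟩
        intro g
        rw [runB]
        simp [scanB_nil vis _ i hdrop]
      · have hget : (PySem.List.pyGetD adj node [])[i]? = some nb := by
          have h0 : ((PySem.List.pyGetD adj node []).drop i)[0]? = some nb := by
            rw [hdrop]; rfl
          rw [List.getElem?_drop] at h0
          simpa using h0
        have hi : i < (PySem.List.pyGetD adj node []).length :=
          (List.getElem?_eq_some_iff.mp hget).1
        have hrest : (PySem.List.pyGetD adj node []).drop (i + 1) = rest := by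
          rw [List.drop_add_one_eq_tail_drop, hdrop]
          rfl
        have hlen' : (PySem.List.pyGetD adj node []).length ≤ (i + 1) + j := by omega
        rw [hdrop, loopA] at heq
        by_cases hm : nb ∈ vis
        · simp only [if_pos hm] at heq
          rw [← hrest] at heq
          obtain ⟨k, hk1, hk2, hrun⟩ := ihj p node (i + 1) stk vis w vis' hlen' heq
          refine ⟨k, hk1, hk2, ?_⟩
          intro g
          rw [runB_skip adj (g + k) p node i stk vis none (scanB_skip vis _ i nb hget hm)]
          exact hrun g
        · simp only [if_neg hm] at heq
          rcases hd : dfsA adj f (1 - p) nb vis with _ | ⟨wc, visc⟩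
          · rw [hd] at heq; simp at heq
          · rw [hd] at heq
            cases f with
            | zero => rw [dfsA] at hd; simp at hd
            | succ f' =>
              rw [dfsA] at hd
              rw [← List.drop_zero (l := PySem.List.pyGetD adj nb [])] at hd
              obtain ⟨kc, hkc1, hkc2, hrunc⟩ := IHf f' (by omega) (1 - p) nb 0
                ((p, node, i + 1) :: stk) (PySem.Set.add vis nb) wc visc hd
              have hlen_add : (PySem.Set.add vis nb).length = vis.length + 1 := by
                rw [PySem.Set.add_of_not_mem hm, List.length_append]
                rfl
              have hscan : scanB vis (PySem.List.pyGetD adj node []) i = some (nb, i + 1) :=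
                scanB_found vis _ i nb hget hm
              by_cases hw : wc = p
              · simp only [if_pos hw, Option.some.injEq, Prod.mk.injEq] at heq
                obtain ⟨rfl, rfl⟩ := heq
                refine ⟨kc + 2, by omega, by omega, ?_⟩
                intro g
                have e1 : runB adj (g + (kc + 2)) ((p, node, i) :: stk) vis none
                    = runB adj (g + 1 + kc) ((1 - p, nb, 0) :: (p, node, i + 1) :: stk)
                        (PySem.Set.add vis nb) none := by
                  rw [show g + (kc + 2) = (g + 1 + kc) + 1 by omega, runB]
                  simp [hscan]
                rw [e1, hrunc (g + 1), runB]
                simp [hw]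
              · simp only [if_neg hw] at heq
                rw [← hrest] at heq
                obtain ⟨k', hk1', hk2', hrun'⟩ := ihj p node (i + 1) stk visc w vis' hlen' heq
                refine ⟨1 + kc + k', by omega, by omega, ?_⟩
                intro g
                have e1 : runB adj (g + (1 + kc + k')) ((p, node, i) :: stk) vis none
                    = runB adj (g + k' + kc) ((1 - p, nb, 0) :: (p, node, i + 1) :: stk)
                        (PySem.Set.add vis nb) none := by
                  rw [show g + (1 + kc + k') = (g + k' + kc) + 1 by omega, runB]
                  simp [hscan]
                rw [e1, hrunc (g + k'),
                  runB_clear adj (g + k') p node (i + 1) stk visc wc hw, hrun' g]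

theorem runB_nil (adj : List (List Int)) (t : Nat) (vis : PySem.Set Int) (ret : Option Int) :
    runB adj t [] vis ret = ret := by
  cases t <;> rfl

-- ===== VERDICT (by name: the statement is the Claim_ definition above) =====
theorem game_on_tree_winner_spec : Claim_equal_game_on_tree_winner := by
  unfold Claim_equal_game_on_tree_winner
  intro n edges init _hD _hP
  unfold Spec_game_on_tree_winner
  simp only [game_on_tree_winner, game_on_tree_winner_alt, pvAdjB_eq]
  set adj := pvAdjA n edges with hadj
  -- A's dfs returns within the fuel the port passes
  have hsuff : (loopA adj (adj.flatten.length + 1) 0 (PySem.List.pyGetD adj init [])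
      (PySem.Set.add PySem.Set.empty init)).isSome :=
    loopA_suff adj (adj.flatten.length + 1) 0 _ _ (pyGetD_nil_subset_flatten adj init)
      (by have := List.countP_le_length (l := adj.flatten) (p := fun x => !decide (x ∈ PySem.Set.add PySem.Set.empty init)); omega)
  obtain ⟨⟨w, vis'⟩, hL⟩ := Option.isSome_iff_exists.mp hsuff
  have hdfs : dfsA adj (adj.flatten.length + 2) 0 init PySem.Set.empty = some (w, vis') := by
    rw [show adj.flatten.length + 2 = (adj.flatten.length + 1) + 1 from rfl, dfsA]
    exact hL
  -- bound the final visited set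
  obtain ⟨-, hnod, helts⟩ := loopA_inv adj (adj.flatten.length + 1) 0 _ _ _ _
    (pyGetD_nil_subset_flatten adj init) hL
  have hvnod : vis'.Nodup := hnod (by simp [PySem.Set.add, PySem.Set.empty])
  have hsub' : vis' ⊆ init :: adj.flatten := by
    intro x hx
    rcases helts x hx with h | h
    · rcases (PySem.Set.mem_add PySem.Set.empty init x).mp h with h' | h'
      · simp [PySem.Set.empty] at h'
      · subst h'; exact List.mem_cons_self
    · exact List.mem_cons_of_mem _ h
  have hlen' : vis'.length ≤ adj.flatten.length + 1 := by
    have h1 : vis'.toFinset.card = vis'.length := List.toFinset_card_of_nodup hvnod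
    have h2 : vis'.toFinset ⊆ (init :: adj.flatten).toFinset := by
      intro x hx
      rw [List.mem_toFinset] at hx ⊢
      exact hsub' hx
    have h3 := Finset.card_le_card h2
    have h4 := List.toFinset_card_le (init :: adj.flatten)
    simp only [List.length_cons] at h4
    omega
  -- B's machine simulates A's dfs
  rw [← List.drop_zero (l := PySem.List.pyGetD adj init [])] at hL
  obtain ⟨k, hk1, hk2, hrun⟩ := simL adj (adj.flatten.length + 1) 0 init 0 []
    (PySem.Set.add PySem.Set.empty init) w vis' hL
  have hlen1 : (PySem.Set.add PySem.Set.empty init).length = 1 := rfl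
  have hrunF : runB adj (3 * adj.flatten.length + 10) [(0, init, 0)]
      (PySem.Set.add PySem.Set.empty init) none = some w := by
    have hkb : k ≤ 3 * adj.flatten.length + 10 := by omega
    have := hrun (3 * adj.flatten.length + 10 - k)
    rw [show 3 * adj.flatten.length + 10 - k + k = 3 * adj.flatten.length + 10 by omega] at this
    rw [this, runB_nil]
  show (match dfsA adj (adj.flatten.length + 2) 0 init PySem.Set.empty with
    | some (w, _) => if w = 0 then "Ron" else "Hermione"
    | none => "Hermione")
    = (if runB adj (3 * adj.flatten.length + 10) [(0, init, 0)]
        (PySem.Set.add PySem.Set.empty init) none = some 0 then "Ron" else "Hermione")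
  rw [hdfs, hrunF]
  by_cases hw : w = 0 <;> simp [hw]
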